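-- pv_equiv track=rewrite | github.com/hira-edu/security-testing-framework | src/modules/process_inventory.py | _classify_directx_usage
-- ===== SOURCE A (Python) =====
-- from typing import Any, Dict, Iterable, List, Optional, Tuple
--
-- def _classify_directx_usage(
--
--     modules: List[str],
--     exclusive_display: bool,
--     window_entries: List[Dict[str, Any]],
-- ) -> Tuple[str, List[str]]:
--     if not modules:
--         return "absent", []
--
--     lower_modules = [module.lower() for module in modules]
--     flags: List[str] = []
--     status = "present"
--
--     if any("dxgi" in module for module in lower_modules):
--         status = "swap_chain"
--         flags.append("dxgi")
--     if any("d3d12" in module or "d3d11" in module for module in lower_modules):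
--         flags.append("d3d11_plus")
--         if status == "present":
--             status = "d3d11"
--     elif any("d3d10" in module for module in lower_modules):
--         flags.append("d3d10")
--         if status == "present":
--             status = "d3d10"
--     elif any("d3d9" in module for module in lower_modules):
--         flags.append("d3d9")
--         if status == "present":
--             status = "d3d9"
--
--     if any("swapchain" in module for module in lower_modules):
--         flags.append("swapchain_module")
--         if status == "present":
--             status = "swap_chain"
--
--     if exclusive_display:
--         flags.append("exclusive_affinity")
--         status = f"{status}_exclusive"
--
--     if any(entry.get("topmost") for entry in window_entries):
--         flags.append("topmost_window")
--
--     return status, sorted(set(flags))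
-- ===== SOURCE B (Python) =====
-- def _classify_directx_usage(modules, exclusive_display, window_entries):
--     if not modules:
--         return "absent", []
--     # one pass: lowercase each module once, record which tokens are present
--     dxgi = d3d11p = d3d10 = d3d9 = swapchain = False
--     for module in modules:
--         m = module.lower()
--         dxgi = dxgi or "dxgi" in m
--         d3d11p = d3d11p or "d3d12" in m or "d3d11" in m
--         d3d10 = d3d10 or "d3d10" in m
--         d3d9 = d3d9 or "d3d9" in m
--         swapchain = swapchain or "swapchain" in m
--     topmost = any(entry.get("topmost") for entry in window_entries)
--
--     if dxgi:
--         status = "swap_chain"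
--     elif d3d11p:
--         status = "d3d11"
--     elif d3d10:
--         status = "d3d10"
--     elif d3d9:
--         status = "d3d9"
--     elif swapchain:
--         status = "swap_chain"
--     else:
--         status = "present"
--     if exclusive_display:
--         status += "_exclusive"
--
--     # flags emitted directly in sorted order (the flag names are pairwise
--     # distinct and listed alphabetically), so no sorted(set(...)) is needed
--     flags = []
--     if d3d10 and not d3d11p:
--         flags.append("d3d10")
--     if d3d11p:
--         flags.append("d3d11_plus")
--     if d3d9 and not d3d11p and not d3d10:
--         flags.append("d3d9")
--     if dxgi:
--         flags.append("dxgi")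
--     if exclusive_display:
--         flags.append("exclusive_affinity")
--     if swapchain:
--         flags.append("swapchain_module")
--     if topmost:
--         flags.append("topmost_window")
--     return status, flags
-- ===== Notes on version B (the rewrite author's own statement) =====
-- stated objective: alternative
-- what changed: B replaces A's five separate any-scans over a pre-lowercased copy of the module list with a single pass that lowercases each module once and records token presence in five booleans, and emits the flag list directly in sorted order so A's final sorted(set(...)) disappears.
import Mathlib
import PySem

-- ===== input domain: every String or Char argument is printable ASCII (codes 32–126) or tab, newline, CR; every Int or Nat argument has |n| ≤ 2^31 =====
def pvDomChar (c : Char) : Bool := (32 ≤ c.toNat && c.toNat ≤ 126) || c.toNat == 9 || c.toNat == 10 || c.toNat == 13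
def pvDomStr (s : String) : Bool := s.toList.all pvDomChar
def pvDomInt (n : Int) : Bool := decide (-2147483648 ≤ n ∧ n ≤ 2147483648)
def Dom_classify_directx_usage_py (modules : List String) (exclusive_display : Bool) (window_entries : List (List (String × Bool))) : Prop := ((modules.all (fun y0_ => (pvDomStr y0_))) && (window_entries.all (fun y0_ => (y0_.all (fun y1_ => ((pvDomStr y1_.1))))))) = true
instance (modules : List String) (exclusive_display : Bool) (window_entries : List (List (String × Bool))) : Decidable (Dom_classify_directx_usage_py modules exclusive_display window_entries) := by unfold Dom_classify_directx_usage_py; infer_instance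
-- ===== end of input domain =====

-- B does the token scan in ONE pass (lowercasing each module once) and emits the
-- flag list directly in sorted order, replacing A's repeated any-scans and the
-- final sorted(set(...)); return values are identical (objective: alternative).

-- ===== PORT A =====
def classify_directx_usage_py (modules : List String) (exclusive_display : Bool) (window_entries : List (List (String × Bool))) : String × List String :=
  if modules = [] then ("absent", [])
  else
    let lower_modules := modules.map PySem.Str.lower
    let flags : List String := []
    let status := "present"
    -- if any("dxgi" ...): status = "swap_chain"; flags.append("dxgi")
    let status := if lower_modules.any (fun module => PySem.Str.isIn "dxgi" module) then "swap_chain" else status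
    let flags := if lower_modules.any (fun module => PySem.Str.isIn "dxgi" module) then flags ++ ["dxgi"] else flags
    -- if any(d3d12/d3d11) / elif any(d3d10) / elif any(d3d9)
    let status :=
      if lower_modules.any (fun module => PySem.Str.isIn "d3d12" module || PySem.Str.isIn "d3d11" module) then
        (if status = "present" then "d3d11" else status)
      else if lower_modules.any (fun module => PySem.Str.isIn "d3d10" module) then
        (if status = "present" then "d3d10" else status)
      else if lower_modules.any (fun module => PySem.Str.isIn "d3d9" module) then
        (if status = "present" then "d3d9" else status)
      else status
    let flags :=
      if lower_modules.any (fun module => PySem.Str.isIn "d3d12" module || PySem.Str.isIn "d3d11" module) then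
        flags ++ ["d3d11_plus"]
      else if lower_modules.any (fun module => PySem.Str.isIn "d3d10" module) then
        flags ++ ["d3d10"]
      else if lower_modules.any (fun module => PySem.Str.isIn "d3d9" module) then
        flags ++ ["d3d9"]
      else flags
    -- NOTE: the status ifs above read the PREVIOUS status, the flags ifs the previous flags;
    -- the two sequences are independent, so splitting each Python if into a status-let and a
    -- flags-let with the same guard is an exact transcription
    let flags := if lower_modules.any (fun module => PySem.Str.isIn "swapchain" module) then flags ++ ["swapchain_module"] else flags
    let status := if lower_modules.any (fun module => PySem.Str.isIn "swapchain" module) then (if status = "present" then "swap_chain" else status) else status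
    let flags := if exclusive_display then flags ++ ["exclusive_affinity"] else flags
    let status := if exclusive_display then status ++ "_exclusive" else status
    let flags :=
      if window_entries.any (fun entry => ((PySem.Dict.mk entry).get? "topmost").getD false) then
        flags ++ ["topmost_window"]
      else flags
    (status, PySem.List.sorted (PySem.Set.ofList flags) (fun x => x) false)

-- ===== PORT B =====
-- one loop iteration of B: lowercase once, OR each token's presence bit
def pvStep (s : Bool × Bool × Bool × Bool × Bool) (module : String) : Bool × Bool × Bool × Bool × Bool :=
  let m := PySem.Str.lower module
  (s.1 || PySem.Str.isIn "dxgi" m,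
   s.2.1 || PySem.Str.isIn "d3d12" m || PySem.Str.isIn "d3d11" m,
   s.2.2.1 || PySem.Str.isIn "d3d10" m,
   s.2.2.2.1 || PySem.Str.isIn "d3d9" m,
   s.2.2.2.2 || PySem.Str.isIn "swapchain" m)

def classify_directx_usage_py_alt (modules : List String) (exclusive_display : Bool) (window_entries : List (List (String × Bool))) : String × List String :=
  if modules = [] then ("absent", [])
  else
    let p := modules.foldl pvStep (false, false, false, false, false)
    let dxgi := p.1
    let d3d11p := p.2.1
    let d3d10 := p.2.2.1
    let d3d9 := p.2.2.2.1
    let swapchain := p.2.2.2.2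
    let topmost := window_entries.any (fun entry => ((PySem.Dict.mk entry).get? "topmost").getD false)
    let status :=
      if dxgi then "swap_chain"
      else if d3d11p then "d3d11"
      else if d3d10 then "d3d10"
      else if d3d9 then "d3d9"
      else if swapchain then "swap_chain"
      else "present"
    let status := if exclusive_display then status ++ "_exclusive" else status
    let flags :=
      (if d3d10 && !d3d11p then ["d3d10"] else []) ++
      (if d3d11p then ["d3d11_plus"] else []) ++
      (if d3d9 && !d3d11p && !d3d10 then ["d3d9"] else []) ++
      (if dxgi then ["dxgi"] else []) ++
      (if exclusive_display then ["exclusive_affinity"] else []) ++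
      (if swapchain then ["swapchain_module"] else []) ++
      (if topmost then ["topmost_window"] else [])
    (status, flags)

-- ===== PRECONDITION & SPEC =====
def Spec_classify_directx_usage_py (modules : List String) (exclusive_display : Bool) (window_entries : List (List (String × Bool))) (out : String × List String) : Prop := out = classify_directx_usage_py_alt modules exclusive_display window_entries
instance (modules : List String) (exclusive_display : Bool) (window_entries : List (List (String × Bool))) (out : String × List String) : Decidable (Spec_classify_directx_usage_py modules exclusive_display window_entries out) := by unfold Spec_classify_directx_usage_py; infer_instance

-- ===== CLAIM (what is proved, stated in full; the proofs are below) =====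
def Claim_equal_classify_directx_usage_py : Prop := ∀ (modules : List String) (exclusive_display : Bool) (window_entries : List (List (String × Bool))), Dom_classify_directx_usage_py modules exclusive_display window_entries → Spec_classify_directx_usage_py modules exclusive_display window_entries (classify_directx_usage_py modules exclusive_display window_entries)

-- ===== LEMMAS AND PROOFS =====

-- strict order on string literals, checked on the character lists (kernel-reducible there)
theorem pvPairwiseLt (l : List String) (h : List.Pairwise (· < ·) (l.map String.toList)) : List.Pairwise (· < ·) l := by
  rw [List.pairwise_map] at h
  exact h.imp (fun hab => String.lt_iff_toList_lt.mpr hab)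

-- B's single fold computes exactly the five any-scans of A
theorem pvStep_foldl (modules : List String) (a b c d e : Bool) :
    modules.foldl pvStep (a, b, c, d, e) =
      (a || modules.any (fun m => PySem.Str.isIn "dxgi" (PySem.Str.lower m)),
       b || modules.any (fun m => PySem.Str.isIn "d3d12" (PySem.Str.lower m) || PySem.Str.isIn "d3d11" (PySem.Str.lower m)),
       c || modules.any (fun m => PySem.Str.isIn "d3d10" (PySem.Str.lower m)),
       d || modules.any (fun m => PySem.Str.isIn "d3d9" (PySem.Str.lower m)),
       e || modules.any (fun m => PySem.Str.isIn "swapchain" (PySem.Str.lower m))) := by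
  induction modules generalizing a b c d e with
  | nil => simp
  | cons x xs ih =>
      simp only [List.foldl_cons, pvStep, List.any_cons, ih, Bool.or_assoc]

-- ===== VERDICT (by name: the statement is the Claim_ definition above) =====
set_option maxHeartbeats 1600000 in
theorem classify_directx_usage_py_spec : Claim_equal_classify_directx_usage_py := by
  intro modules exclusive_display window_entries _
  unfold Spec_classify_directx_usage_py classify_directx_usage_py classify_directx_usage_py_alt
  by_cases h : modules = []
  · simp [h]
  · simp only [if_neg h, pvStep_foldl, Bool.false_or, List.any_map, Function.comp_def]
    cases h1 : modules.any (fun m => PySem.Str.isIn "dxgi" (PySem.Str.lower m)) <;>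
    cases h2 : modules.any (fun m => PySem.Str.isIn "d3d12" (PySem.Str.lower m) || PySem.Str.isIn "d3d11" (PySem.Str.lower m)) <;>
    cases h3 : modules.any (fun m => PySem.Str.isIn "d3d10" (PySem.Str.lower m)) <;>
    cases h4 : modules.any (fun m => PySem.Str.isIn "d3d9" (PySem.Str.lower m)) <;>
    cases h5 : modules.any (fun m => PySem.Str.isIn "swapchain" (PySem.Str.lower m)) <;>
    cases h6 : exclusive_display <;>
    cases h7 : window_entries.any (fun entry => ((PySem.Dict.mk entry).get? "topmost").getD false) <;>
      simp <;>
      exact PySem.List.sorted_eq_of_perm_of_pairwise_lt _ _ _ (by decide) (pvPairwiseLt _ (by decide))
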